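-- pv_equiv track=rewrite | github.com/pypi-data/pypi-mirror-138 | packages/move-jismeshcode/move_jismeshcode-0.0.5-py3-none-any.whl/move_jismeshcode/move.py | _moveXBelow9Iter
-- ===== SOURCE A (Python) =====
-- def _moveXBelow9Iter(num, add=1):
--   xkuriage = 0
--   if add > 0:
--     for i in range(add):
--       num, b = _moveXBelow9(num)
--       xkuriage += b
--   else:
--     for i in range(-add):
--       num, b = _moveXBelow9(num, False)
--       xkuriage += b
--   return num, xkuriage,
--
-- def _moveXBelow9(num, positive=True):
--   if num % 2 == 0:
--     if positive:
--       return num - 1, 1 # 繰り上がり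
--     else:
--       return num - 1, 0
--   else:
--     if positive:
--       return num + 1, 0
--     else:
--       return num + 1, -1 # 繰り下がり
-- ===== SOURCE B (Python) =====
-- def _moveXBelow9Iter(num, add=1):
--     # Closed form: num oscillates with period 2, so only the parity of |add|
--     # decides the final number; carries are one per step that starts on the
--     # 'carrying' parity, which is a ceiling/floor of |add|/2 by initial parity.
--     k = add if add > 0 else -add
--     even = num % 2 == 0
--     if k % 2 == 0:
--         final = num
--     else:
--         final = num - 1 if even else num + 1
--     if add > 0:
--         kuriage = (k + (1 if even else 0)) // 2
--     else:
--         kuriage = -((k + (0 if even else 1)) // 2)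
--     return final, kuriage
-- ===== Notes on version B (the rewrite author's own statement) =====
-- stated objective: faster
-- what changed: Replaced the |add|-step toggle loop by a closed form: the number oscillates with period 2, so the result depends only on the parities of num and |add|, and the carry count is a ceiling/floor of |add|/2.
import Mathlib
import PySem

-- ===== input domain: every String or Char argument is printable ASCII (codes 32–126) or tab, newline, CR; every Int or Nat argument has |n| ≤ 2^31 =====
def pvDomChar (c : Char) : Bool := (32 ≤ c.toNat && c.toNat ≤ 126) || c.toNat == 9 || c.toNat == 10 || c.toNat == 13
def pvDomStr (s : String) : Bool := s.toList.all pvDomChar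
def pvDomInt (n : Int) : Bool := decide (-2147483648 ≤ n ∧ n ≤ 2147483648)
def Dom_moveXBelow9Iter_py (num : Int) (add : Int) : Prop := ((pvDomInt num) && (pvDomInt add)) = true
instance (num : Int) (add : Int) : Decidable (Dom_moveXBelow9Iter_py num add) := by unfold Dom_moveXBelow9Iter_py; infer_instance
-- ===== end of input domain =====

-- B replaces A's |add|-step toggle loop by an O(1) closed form over the parities of num and |add|.

-- ===== PORT A =====
-- helper _moveXBelow9(num, positive)
def moveXBelow9 (num : Int) (positive : Bool) : Int × Int :=
  if PySem.Int.mod num 2 == 0 then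
    if positive then (num - 1, 1) else (num - 1, 0)
  else
    if positive then (num + 1, 0) else (num + 1, -1)

def moveXBelow9Iter_py (num : Int) (add : Int) : Int × Int :=
  if add > 0 then
    (PySem.List.pyRange 0 add 1).foldl
      (fun (s : Int × Int) _ =>
        let nb := moveXBelow9 s.1 true
        (nb.1, s.2 + nb.2)) (num, 0)
  else
    (PySem.List.pyRange 0 (-add) 1).foldl
      (fun (s : Int × Int) _ =>
        let nb := moveXBelow9 s.1 false
        (nb.1, s.2 + nb.2)) (num, 0)

-- ===== PORT B =====
def moveXBelow9Iter_py_alt (num : Int) (add : Int) : Int × Int :=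
  let k := if add > 0 then add else -add
  let even := PySem.Int.mod num 2 == 0
  let final := if PySem.Int.mod k 2 == 0 then num
               else if even then num - 1 else num + 1
  let kuriage := if add > 0 then PySem.Int.floordiv (k + (if even then 1 else 0)) 2
                 else -(PySem.Int.floordiv (k + (if even then 0 else 1)) 2)
  (final, kuriage)

-- ===== PRECONDITION & SPEC =====
def Spec_moveXBelow9Iter_py (num : Int) (add : Int) (out : Int × Int) : Prop := out = moveXBelow9Iter_py_alt num add
instance (num : Int) (add : Int) (out : Int × Int) : Decidable (Spec_moveXBelow9Iter_py num add out) := by unfold Spec_moveXBelow9Iter_py; infer_instance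

-- ===== CLAIM (what is proved, stated in full; the proofs are below) =====
def Claim_equal_moveXBelow9Iter_py : Prop := ∀ (num : Int) (add : Int), Dom_moveXBelow9Iter_py num add → Spec_moveXBelow9Iter_py num add (moveXBelow9Iter_py num add)

-- ===== LEMMAS AND PROOFS =====

-- the fold ignores the range elements: restate it as a Nat-indexed iteration
def iterStep (positive : Bool) : Nat → Int × Int → Int × Int
  | 0, s => s
  | k+1, s =>
      let nb := moveXBelow9 s.1 positive
      iterStep positive k (nb.1, s.2 + nb.2)

theorem foldl_eq_iterStep (positive : Bool) (l : List Int) (s : Int × Int) :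
    l.foldl (fun (s : Int × Int) _ =>
        let nb := moveXBelow9 s.1 positive
        (nb.1, s.2 + nb.2)) s = iterStep positive l.length s := by
  induction l generalizing s with
  | nil => rfl
  | cons x xs ih => simp [List.foldl, iterStep, ih]

theorem mod_two_emod (n : Int) : PySem.Int.mod n 2 = n % 2 :=
  PySem.Int.mod_eq_emod_of_pos (by omega)

theorem iterStep_closed_pos (k : Nat) : ∀ (num c : Int),
    iterStep true k (num, c) =
      ((if (k : Int) % 2 = 0 then num
        else if num % 2 = 0 then num - 1 else num + 1),
       c + ((k : Int) + (if num % 2 = 0 then 1 else 0)) / 2) := by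
  induction k with
  | zero =>
    intro num c
    simp only [iterStep, Nat.cast_zero, Prod.mk.injEq]
    constructor <;> (try split_ifs) <;> omega
  | succ k ih =>
    intro num c
    have hm := mod_two_emod num
    rcases Int.emod_two_eq num with h | h <;>
      · simp only [iterStep, moveXBelow9, hm, h]
        norm_num
        rw [ih]
        simp only [Prod.mk.injEq]
        constructor <;> (try split_ifs) <;> omega

theorem iterStep_closed_neg (k : Nat) : ∀ (num c : Int),
    iterStep false k (num, c) =
      ((if (k : Int) % 2 = 0 then num
        else if num % 2 = 0 then num - 1 else num + 1),
       c - ((k : Int) + (if num % 2 = 0 then 0 else 1)) / 2) := by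
  induction k with
  | zero =>
    intro num c
    simp only [iterStep, Nat.cast_zero, Prod.mk.injEq]
    constructor <;> (try split_ifs) <;> omega
  | succ k ih =>
    intro num c
    have hm := mod_two_emod num
    rcases Int.emod_two_eq num with h | h <;>
      · simp only [iterStep, moveXBelow9, hm, h]
        norm_num
        rw [ih]
        simp only [Prod.mk.injEq]
        constructor <;> (try split_ifs) <;> omega

-- ===== VERDICT (by name: the statement is the Claim_ definition above) =====
theorem moveXBelow9Iter_py_spec : Claim_equal_moveXBelow9Iter_py := by
  intro num add _
  unfold Spec_moveXBelow9Iter_py moveXBelow9Iter_py moveXBelow9Iter_py_alt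
  by_cases hpos : add > 0 <;> simp only [hpos, if_true, if_false]
  · rw [foldl_eq_iterStep, PySem.List.length_pyRange_one, iterStep_closed_pos]
    have hk : ((add.toNat : Int)) = add := by omega
    simp only [Int.sub_zero, hk, mod_two_emod,
      PySem.Int.floordiv_eq_ediv_of_pos (by omega : (0:Int) < 2)]
    simp
  · rw [foldl_eq_iterStep, PySem.List.length_pyRange_one, iterStep_closed_neg]
    have hk : (((-add).toNat : Int)) = -add := by omega
    simp only [Int.sub_zero, hk, mod_two_emod,
      PySem.Int.floordiv_eq_ediv_of_pos (by omega : (0:Int) < 2)]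
    simp [sub_eq_add_neg]
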